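-- pv_equiv track=rewrite | github.com/mrap/boi | lib/preflight_context.py | _summarize_section
-- ===== SOURCE A (Python) =====
-- def _summarize_section(content: str) -> str:
--     """Keep headers + first 2 lines of each section for truncation."""
--     lines = content.split("\n")
--     result = []
--     section_lines = 0
--     for line in lines:
--         if line.startswith("#"):
--             result.append(line)
--             section_lines = 0
--         elif section_lines < 2:
--             result.append(line)
--             section_lines += 1
--     return "\n".join(result)
-- ===== SOURCE B (Python) =====
-- def _summarize_section(content: str) -> str:
--     """Keep headers + first 2 lines of each section for truncation."""
--     lines = content.split("\n")
--     sections = []          # completed sections: (header_or_None, body_lines)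
--     header, body = None, []
--     for line in lines:
--         if line.startswith("#"):
--             sections.append((header, body))
--             header, body = line, []
--         else:
--             body.append(line)
--     sections.append((header, body))
--     parts = []
--     for h, b in sections:
--         if h is not None:
--             parts.append(h)
--         parts.extend(b[:2])
--     return "\n".join(parts)
-- ===== Notes on version B (the rewrite author's own statement) =====
-- stated objective: alternative
-- what changed: Replaces A's single pass with a running per-section line counter by a two-phase decomposition: first group the lines into (header, body) sections (with a headerless preamble section), then flatten each section as header plus body[:2].
import Mathlib
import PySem

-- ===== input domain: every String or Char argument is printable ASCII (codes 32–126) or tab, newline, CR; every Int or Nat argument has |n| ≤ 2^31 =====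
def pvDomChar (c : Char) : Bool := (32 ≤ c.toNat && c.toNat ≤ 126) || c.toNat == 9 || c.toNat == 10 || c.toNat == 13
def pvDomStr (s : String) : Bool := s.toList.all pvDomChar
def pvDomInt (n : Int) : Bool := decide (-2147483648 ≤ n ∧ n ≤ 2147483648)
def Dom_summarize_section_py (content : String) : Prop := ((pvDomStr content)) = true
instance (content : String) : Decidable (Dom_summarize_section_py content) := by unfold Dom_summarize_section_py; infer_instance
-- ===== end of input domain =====

-- B replaces A's running per-section line counter by a two-phase decomposition
-- (group lines into (header, body) sections, then flatten keeping body[:2]); objective: alternative structure, same cost.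


-- ===== PORT A =====
-- the loop body of A: state is (result, section_lines)
def pvAStep (st : List String × Int) (line : String) : List String × Int :=
  if PySem.Str.startswith line "#" then (st.1 ++ [line], 0)
  else if st.2 < 2 then (st.1 ++ [line], st.2 + 1)
  else st

def summarize_section_py (content : String) : String :=
  let lines := (PySem.Str.split? content "\n").getD []
  let st := lines.foldl pvAStep ([], 0)
  PySem.Str.join "\n" st.1

-- ===== PORT B =====
-- B's grouping loop body: state is (completed sections, current header, current body)
def pvBStep (st : List (Option String × List String) × Option String × List String)
    (line : String) : List (Option String × List String) × Option String × List String :=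
  if PySem.Str.startswith line "#" then (st.1 ++ [(st.2.1, st.2.2)], some line, [])
  else (st.1, st.2.1, st.2.2 ++ [line])

-- B's flattening loop body: header (if any) then body[:2]
def pvFlatStep (acc : List String) (sec : Option String × List String) : List String :=
  acc ++ sec.1.toList ++ PySem.List.slice sec.2 none (some 2)

def summarize_section_py_alt (content : String) : String :=
  let lines := (PySem.Str.split? content "\n").getD []
  let st := lines.foldl pvBStep ([], none, [])
  let sections := st.1 ++ [(st.2.1, st.2.2)]
  PySem.Str.join "\n" (sections.foldl pvFlatStep [])

-- ===== PRECONDITION & SPEC =====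
def Spec_summarize_section_py (content : String) (out : String) : Prop := out = summarize_section_py_alt content
instance (content : String) (out : String) : Decidable (Spec_summarize_section_py content out) := by unfold Spec_summarize_section_py; infer_instance

-- ===== CLAIM (what is proved, stated in full; the proofs are below) =====
def Claim_equal_summarize_section_py : Prop := ∀ (content : String), Dom_summarize_section_py content → Spec_summarize_section_py content (summarize_section_py content)

-- ===== LEMMAS AND PROOFS =====

theorem pvFlat_append_singleton (secs : List (Option String × List String))
    (x : Option String × List String) :
    (secs ++ [x]).foldl pvFlatStep [] =
      secs.foldl pvFlatStep [] ++ x.1.toList ++ x.2.take 2 := by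
  rw [List.foldl_append]
  simp [pvFlatStep, PySem.List.slice_to]

theorem pvLoop_eq (ls : List String) (res : List String)
    (secs : List (Option String × List String)) (h : Option String) (body : List String)
    (n : Int) (hn : n = min (body.length : Int) 2)
    (hres : res = secs.foldl pvFlatStep [] ++ h.toList ++ body.take 2) :
    (ls.foldl pvAStep (res, n)).1 =
      (let st := ls.foldl pvBStep (secs, h, body);
       (st.1 ++ [(st.2.1, st.2.2)]).foldl pvFlatStep []) := by
  induction ls generalizing res secs h body n with
  | nil =>
    simp only [List.foldl_nil, pvFlat_append_singleton]
    exact hres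
  | cons line ls ih =>
    simp only [List.foldl_cons]
    by_cases hs : PySem.Str.startswith line "#" = true
    · -- header line: close the current section
      have hA : pvAStep (res, n) line = (res ++ [line], 0) := by
        simp only [pvAStep]; rw [if_pos hs]
      have hB : pvBStep (secs, h, body) line = (secs ++ [(h, body)], some line, []) := by
        simp only [pvBStep]; rw [if_pos hs]
      rw [hA, hB]
      exact ih (res ++ [line]) (secs ++ [(h, body)]) (some line) [] 0 (by simp)
        (by rw [pvFlat_append_singleton]; simp [hres])
    · have hB : pvBStep (secs, h, body) line = (secs, h, body ++ [line]) := by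
        simp only [pvBStep]; rw [if_neg hs]
      by_cases hlt : body.length < 2
      · -- still collecting: A appends, B grows the body
        have hA : pvAStep (res, n) line = (res ++ [line], n + 1) := by
          simp only [pvAStep]; rw [if_neg hs, if_pos (by omega)]
        rw [hA, hB]
        exact ih (res ++ [line]) secs h (body ++ [line]) (n + 1)
          (by simp only [List.length_append, List.length_cons, List.length_nil]
              push_cast
              omega)
          (by subst hres
              rw [List.take_of_length_le (by omega : body.length ≤ 2),
                List.take_of_length_le (by simp; omega)]
              simp)
      · -- section full: A skips, B grows the body but take 2 is unchanged
        have hA : pvAStep (res, n) line = (res, n) := by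
          simp only [pvAStep]; rw [if_neg hs, if_neg (by omega)]
        rw [hA, hB]
        exact ih res secs h (body ++ [line]) n
          (by simp only [List.length_append, List.length_cons, List.length_nil]
              push_cast
              omega)
          (by rw [hres, List.take_append_of_le_length (by omega)])

-- ===== VERDICT (by name: the statement is the Claim_ definition above) =====
theorem summarize_section_py_spec : Claim_equal_summarize_section_py := by
  intro content _
  unfold Spec_summarize_section_py summarize_section_py summarize_section_py_alt
  simp only [pvLoop_eq ((PySem.Str.split? content "\n").getD []) [] [] none [] 0 (by simp) (by simp)]
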